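-- pv_equiv track=rewrite | github.com/YiftahCooper/olkb-planck-oryx-converter | scripts/oryx_to_olkb.py | transpose_to_olkb_matrix
-- ===== SOURCE A (Python) =====
-- def transpose_to_olkb_matrix(keys):
--     """Convert a 48-key 4x12 visual layout into an 8x6 OLKB Planck Rev 6 matrix."""
--     current_keys = list(keys)
--
--     if len(current_keys) == 47:
--         current_keys.insert(41, current_keys[41])
--     elif len(current_keys) < 47:
--         while len(current_keys) < 48:
--             current_keys.append("KC_NO")
--
--     matrix = [["KC_NO" for _ in range(6)] for _ in range(8)]
--
--     for i in range(48):
--         if i >= len(current_keys):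
--             break
--         keycode = current_keys[i]
--
--         visual_row = i // 12
--         visual_col = i % 12
--
--         if visual_col < 6:
--             target_row = visual_row
--             target_col = visual_col
--         else:
--             target_row = visual_row + 4
--             target_col = visual_col - 6
--
--         matrix[target_row][target_col] = keycode
--
--     return matrix
-- ===== SOURCE B (Python) =====
-- def transpose_to_olkb_matrix(keys):
--     """Convert a 48-key 4x12 visual layout into an 8x6 OLKB Planck Rev 6 matrix."""
--     ck = list(keys)
--     if len(ck) == 47:
--         ck = ck[:41] + [ck[41]] + ck[41:]
--     elif len(ck) < 47:
--         ck = ck + ["KC_NO"] * (48 - len(ck))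
--     top = [list(ck[r * 12 : r * 12 + 6]) for r in range(4)]
--     bottom = [list(ck[r * 12 + 6 : r * 12 + 12]) for r in range(4)]
--     return top + bottom
-- ===== Notes on version B (the rewrite author's own statement) =====
-- stated objective: simpler
-- what changed: B keeps A's normalization (duplicate index 41 at len 47, pad to 48) but replaces the 48-iteration loop with i//12,i%12 per-element placement into a preallocated 8x6 matrix by directly building the 8 rows as slices: the left and right halves of each of the 4 visual rows.
import Mathlib
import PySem

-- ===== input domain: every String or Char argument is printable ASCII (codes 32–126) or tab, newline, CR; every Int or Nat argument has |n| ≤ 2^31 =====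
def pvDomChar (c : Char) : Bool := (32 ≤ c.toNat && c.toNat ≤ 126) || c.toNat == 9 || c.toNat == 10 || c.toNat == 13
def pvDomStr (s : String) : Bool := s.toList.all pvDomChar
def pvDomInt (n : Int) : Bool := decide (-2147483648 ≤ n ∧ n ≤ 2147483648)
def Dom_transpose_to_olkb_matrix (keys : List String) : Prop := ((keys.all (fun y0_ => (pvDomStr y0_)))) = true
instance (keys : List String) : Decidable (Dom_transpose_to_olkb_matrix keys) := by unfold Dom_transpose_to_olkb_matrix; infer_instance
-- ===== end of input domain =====

-- B rebuilds the matrix by slicing each visual row into two halves instead of A's per-index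
-- i//12,i%12 placement loop; objective: simpler. Equivalence proved for all inputs.

-- ===== PORT A =====
-- while len(current_keys) < 48: current_keys.append("KC_NO")
def padWhileA (xs : List String) : List String :=
  if xs.length < 48 then padWhileA (xs ++ ["KC_NO"]) else xs
  termination_by 48 - xs.length
  decreasing_by simp; omega

-- the normalization block of A (insert duplicate at 41 / pad to 48)
def normA (keys : List String) : List String :=
  let current_keys := keys
  if PySem.List.len current_keys = 47 then
    PySem.List.insert current_keys 41 (PySem.List.pyGetD current_keys 41 "KC_NO")
  else if PySem.List.len current_keys < 47 then
    padWhileA current_keys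
  else current_keys

-- the matrix-filling loop of A; the Python `if i >= len(...): break` is ported as skipping the
-- iteration (exact: the break condition is monotone in i, so skipping one skips all later ones too)
def loopA (current_keys : List String) : List (List String) :=
  let matrix : List (List String) :=
    (PySem.List.pyRange 0 8 1).map (fun _ => (PySem.List.pyRange 0 6 1).map (fun _ => "KC_NO"))
  (PySem.List.pyRange 0 48 1).foldl (fun matrix i =>
    if PySem.List.len current_keys ≤ i then matrix
    else
      let keycode := PySem.List.pyGetD current_keys i "KC_NO"
      let visual_row := PySem.Int.floordiv i 12
      let visual_col := PySem.Int.mod i 12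
      let target_row := if visual_col < 6 then visual_row else visual_row + 4
      let target_col := if visual_col < 6 then visual_col else visual_col - 6
      PySem.List.pySetD matrix target_row
        (PySem.List.pySetD (PySem.List.pyGetD matrix target_row []) target_col keycode)) matrix

def transpose_to_olkb_matrix (keys : List String) : List (List String) :=
  loopA (normA keys)

-- ===== PORT B =====
-- Source B's normalization: ck[:41] + [ck[41]] + ck[41:]  /  ck + ["KC_NO"] * (48 - len(ck))
-- (when this branch runs len(ck) < 47, so the Nat subtraction 48 - ck.length is exact)
def normB (keys : List String) : List String :=
  let ck := keys
  if PySem.List.len ck = 47 then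
    PySem.List.slice ck none (some 41) ++ [PySem.List.pyGetD ck 41 "KC_NO"]
      ++ PySem.List.slice ck (some 41) none
  else if PySem.List.len ck < 47 then
    ck ++ List.replicate (48 - ck.length) "KC_NO"
  else ck

-- Source B's two slice comprehensions: top halves then bottom halves of the 4 visual rows
def rowsB (ck : List String) : List (List String) :=
  ((PySem.List.pyRange 0 4 1).map (fun r => PySem.List.slice ck (some (r*12)) (some (r*12+6))))
  ++ ((PySem.List.pyRange 0 4 1).map (fun r => PySem.List.slice ck (some (r*12+6)) (some (r*12+12))))

def transpose_to_olkb_matrix_alt (keys : List String) : List (List String) :=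
  rowsB (normB keys)

-- ===== PRECONDITION & SPEC =====
def Spec_transpose_to_olkb_matrix (keys : List String) (out : List (List String)) : Prop := out = transpose_to_olkb_matrix_alt keys
instance (keys : List String) (out : List (List String)) : Decidable (Spec_transpose_to_olkb_matrix keys out) := by unfold Spec_transpose_to_olkb_matrix; infer_instance

-- ===== CLAIM (what is proved, stated in full; the proofs are below) =====
def Claim_equal_transpose_to_olkb_matrix : Prop := ∀ (keys : List String), Dom_transpose_to_olkb_matrix keys → Spec_transpose_to_olkb_matrix keys (transpose_to_olkb_matrix keys)

-- ===== LEMMAS AND PROOFS =====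
-- flat index of matrix cell (r, c) in the normalized key list
def pvIdx (r c : Nat) : Nat := if r < 4 then 12*r + c else 12*(r-4) + 6 + c

-- A's loop body, rephrased over Nat indices and List.set
def pvG (L : List String) (m : List (List String)) (k : Nat) : List (List String) :=
  let tr := if k % 12 < 6 then k / 12 else k / 12 + 4
  let tc := if k % 12 < 6 then k % 12 else k % 12 - 6
  m.set tr ((m.getD tr []).set tc (L.getD k "KC_NO"))

-- the matrix after the first n iterations of A's loop
def pvM (L : List String) (n : Nat) : List (List String) :=
  (List.range 8).map (fun r => (List.range 6).map (fun c =>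
    if pvIdx r c < n then L.getD (pvIdx r c) "KC_NO" else "KC_NO"))

theorem set_map_range {α : Type} (n r : Nat) (f : Nat → α) (v : α) (h : r < n) :
    ((List.range n).map f).set r v = (List.range n).map (fun j => if j = r then v else f j) := by
  apply List.ext_getElem
  · simp
  · intro i h1 h2
    simp only [List.getElem_set, List.getElem_map, List.getElem_range]
    simp only [List.length_set, List.length_map, List.length_range] at h1
    split_ifs with h3 h4 h4
    · rfl
    · exact absurd h3.symm h4
    · exact absurd h4.symm h3
    · rfl

theorem getD_map_range' {α : Type} (n r : Nat) (f : Nat → α) (d : α) (h : r < n) :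
    ((List.range n).map f).getD r d = f r := by
  rw [List.getD_eq_getElem _ _ (by simpa using h)]
  simp

theorem pv_step (L : List String) (n : Nat) (h : n < 48) :
    pvG L (pvM L n) n = pvM L (n+1) := by
  simp only [pvG, pvM]
  by_cases h6 : n % 12 < 6
  · simp only [if_pos h6]
    rw [getD_map_range' 8 _ _ _ (by omega), set_map_range 6 _ _ _ (by omega),
        set_map_range 8 _ _ _ (by omega)]
    apply List.map_congr_left
    intro r hr
    simp only [List.mem_range] at hr
    split_ifs with hR <;>
    · apply List.map_congr_left
      intro c hc
      simp only [List.mem_range] at hc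
      simp only [pvIdx]
      split_ifs <;> first | rfl | omega | (congr 1 <;> first | rfl | omega) | (congr 2 <;> first | rfl | omega)
  · simp only [if_neg h6]
    rw [getD_map_range' 8 _ _ _ (by omega), set_map_range 6 _ _ _ (by omega),
        set_map_range 8 _ _ _ (by omega)]
    apply List.map_congr_left
    intro r hr
    simp only [List.mem_range] at hr
    split_ifs with hR <;>
    · apply List.map_congr_left
      intro c hc
      simp only [List.mem_range] at hc
      simp only [pvIdx]
      split_ifs <;> first | rfl | omega | (congr 1 <;> first | rfl | omega) | (congr 2 <;> first | rfl | omega)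

theorem pv_inv (L : List String) (n : Nat) (hn : n ≤ 48) :
    (List.range n).foldl (pvG L) (pvM L 0) = pvM L n := by
  induction n with
  | zero => rfl
  | succ m ih =>
    rw [List.range_succ, List.foldl_append, ih (by omega), List.foldl_cons, List.foldl_nil,
        pv_step L m (by omega)]

theorem drop_take_six (L : List String) (a : Nat) (h : a + 6 ≤ L.length) :
    List.take 6 (List.drop a L) = (List.range 6).map (fun c => L[a + c]?.getD "KC_NO") := by
  apply List.ext_getElem
  · simp; omega
  · intro i h1 h2
    simp only [List.getElem_take, List.getElem_drop, List.getElem_map, List.getElem_range]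
    have hi : a + i < L.length := by simp at h1; omega
    rw [List.getElem?_eq_getElem hi]
    rfl

theorem pv_rows (L : List String) (h : 48 ≤ L.length) :
    pvM L 48 = rowsB L := by
  unfold pvM rowsB
  rw [show PySem.List.pyRange 0 4 1 = [0,1,2,3] from by decide]
  simp only [List.map_cons, List.map_nil]
  norm_num [PySem.List.slice_toNat]
  simp only [show (6:Int).toNat = 6 from rfl, show (12:Int).toNat = 12 from rfl, show (18:Int).toNat = 18 from rfl, show (24:Int).toNat = 24 from rfl, show (30:Int).toNat = 30 from rfl, show (36:Int).toNat = 36 from rfl, show (42:Int).toNat = 42 from rfl, show (48:Int).toNat = 48 from rfl]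
  norm_num
  rw [show (List.range 8) = [0,1,2,3,4,5,6,7] from by decide]
  simp only [List.map_cons, List.map_nil]
  simp only [List.cons.injEq, and_true]
  refine ⟨?_, ?_, ?_, ?_, ?_, ?_, ?_, ?_⟩
  · rw [show List.take 6 L = List.take 6 (List.drop 0 L) from by rw [List.drop_zero],
        drop_take_six L 0 (by omega)]
    apply List.map_congr_left
    intro c hc
    simp only [List.mem_range] at hc
    simp only [pvIdx]
    split_ifs <;> first | omega | (congr 2 <;> first | rfl | omega)
  · rw [drop_take_six L 12 (by omega)]
    apply List.map_congr_left
    intro c hc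
    simp only [List.mem_range] at hc
    simp only [pvIdx]
    split_ifs <;> first | omega | (congr 2 <;> first | rfl | omega)
  · rw [drop_take_six L 24 (by omega)]
    apply List.map_congr_left
    intro c hc
    simp only [List.mem_range] at hc
    simp only [pvIdx]
    split_ifs <;> first | omega | (congr 2 <;> first | rfl | omega)
  · rw [drop_take_six L 36 (by omega)]
    apply List.map_congr_left
    intro c hc
    simp only [List.mem_range] at hc
    simp only [pvIdx]
    split_ifs <;> first | omega | (congr 2 <;> first | rfl | omega)
  · rw [drop_take_six L 6 (by omega)]
    apply List.map_congr_left
    intro c hc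
    simp only [List.mem_range] at hc
    simp only [pvIdx]
    split_ifs <;> first | omega | (congr 2 <;> first | rfl | omega)
  · rw [drop_take_six L 18 (by omega)]
    apply List.map_congr_left
    intro c hc
    simp only [List.mem_range] at hc
    simp only [pvIdx]
    split_ifs <;> first | omega | (congr 2 <;> first | rfl | omega)
  · rw [drop_take_six L 30 (by omega)]
    apply List.map_congr_left
    intro c hc
    simp only [List.mem_range] at hc
    simp only [pvIdx]
    split_ifs <;> first | omega | (congr 2 <;> first | rfl | omega)
  · rw [drop_take_six L 42 (by omega)]
    apply List.map_congr_left
    intro c hc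
    simp only [List.mem_range] at hc
    simp only [pvIdx]
    split_ifs <;> first | omega | (congr 2 <;> first | rfl | omega)


theorem loop_eq_rows (L : List String) (h : 48 ≤ L.length) : loopA L = rowsB L := by
  unfold loopA
  rw [show PySem.List.pyRange 0 48 1 = (List.range 48).map Nat.cast from by decide]
  rw [List.foldl_map]
  refine Eq.trans (PySem.List.foldl_congr_mem _ _ (pvG L) _ ?_) ?_
  · intro acc k hk
    simp only [List.mem_range] at hk
    rw [if_neg (by simp only [PySem.List.len_eq]; push_cast; omega)]
    have hdiv : PySem.Int.floordiv ((k:Nat) : Int) 12 = ((k/12 : Nat) : Int) := by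
      simp [PySem.Int.floordiv, Int.fdiv_eq_ediv]
    have hmod : PySem.Int.mod ((k:Nat) : Int) 12 = ((k%12 : Nat) : Int) := by
      simp [PySem.Int.mod, Int.fmod_eq_emod]
    rw [hdiv, hmod]
    simp only [pvG, PySem.List.pyGetD_natCast, PySem.List.pySetD_natCast]
    by_cases hc : k % 12 < 6
    · rw [if_pos (show ((k % 12 : Nat) : Int) < 6 by exact_mod_cast hc),
          if_pos (show ((k % 12 : Nat) : Int) < 6 by exact_mod_cast hc), if_pos hc, if_pos hc]
      simp only [PySem.List.pySetD_natCast, PySem.List.pyGetD_natCast,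
        List.getD_eq_getElem?_getD]
    · rw [if_neg (show ¬ ((k % 12 : Nat) : Int) < 6 by push_cast; omega),
          if_neg (show ¬ ((k % 12 : Nat) : Int) < 6 by push_cast; omega), if_neg hc, if_neg hc]
      rw [show ((k/12 : Nat) : Int) + 4 = (((k/12 + 4) : Nat) : Int) from by push_cast; ring,
          show ((k%12 : Nat) : Int) - 6 = (((k%12 - 6) : Nat) : Int) from by
            push_cast [Nat.cast_sub (by omega : 6 ≤ k % 12)]; ring]
      simp only [PySem.List.pySetD_natCast, PySem.List.pyGetD_natCast,
        List.getD_eq_getElem?_getD]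
  rw [show ((PySem.List.pyRange 0 8 1).map (fun _ => (PySem.List.pyRange 0 6 1).map (fun _ => "KC_NO")))
      = pvM L 0 from by simp [pvM]]
  exact (pv_inv L 48 le_rfl).trans (pv_rows L h)

theorem pad_eq (n : Nat) (xs : List String) (h : 48 - xs.length = n) :
    padWhileA xs = xs ++ List.replicate n "KC_NO" := by
  induction n generalizing xs with
  | zero => rw [padWhileA, if_neg (by omega)]; simp
  | succ m ih =>
    rw [padWhileA, if_pos (by omega)]
    rw [ih (xs ++ ["KC_NO"]) (by simp; omega)]
    simp [List.replicate_succ]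

theorem norm_eq (keys : List String) : normA keys = normB keys := by
  simp only [normA, normB]
  split_ifs with h1 h2
  · have hlen : keys.length = 47 := by simp [PySem.List.len_eq] at h1; omega
    rw [PySem.List.insert_ofNat keys 41 _ (by omega),
        PySem.List.slice_to, PySem.List.slice_from, show (41:Int).toNat = 41 from rfl]
    · simp
    · norm_num
    · norm_num
  · rw [pad_eq (48 - keys.length) keys rfl]
  · rfl

theorem norm_len (keys : List String) : 48 ≤ (normB keys).length := by
  simp only [normB]
  split_ifs with h1 h2
  · have hlen : keys.length = 47 := by simp [PySem.List.len_eq] at h1; omega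
    rw [PySem.List.slice_to, PySem.List.slice_from, show (41:Int).toNat = 41 from rfl]
    · simp; omega
    · norm_num
    · norm_num
  · simp only [PySem.List.len_eq] at h2
    simp
    omega
  · simp only [PySem.List.len_eq] at h1 h2
    omega

-- ===== VERDICT (by name: the statement is the Claim_ definition above) =====
theorem transpose_to_olkb_matrix_spec : Claim_equal_transpose_to_olkb_matrix := by
  intro keys _
  unfold Spec_transpose_to_olkb_matrix transpose_to_olkb_matrix transpose_to_olkb_matrix_alt
  rw [norm_eq]
  exact loop_eq_rows (normB keys) (norm_len keys)
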